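-- pv_equiv track=rewrite | github.com/thm-msror/SLR-Auto | src/atlas/results/generate_full_draft.py | _inject_prisma_before_last_paragraph
-- ===== SOURCE A (Python) =====
-- def _inject_prisma_before_last_paragraph(methodology: str, prisma_svg: str) -> str:
--     paragraphs = [part.strip() for part in methodology.split("\n\n") if part.strip()]
--     svg_block = "\n".join(
--         [
--             '<div class="prisma-flow">',
--             prisma_svg,
--             "</div>",
--         ]
--     )
--
--     if not paragraphs:
--         return svg_block
--     if len(paragraphs) == 1:
--         return f"{svg_block}\n\n{paragraphs[0]}"
--
--     head = "\n\n".join(paragraphs[:-1]).strip()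
--     tail = paragraphs[-1]
--     return f"{head}\n\n{svg_block}\n\n{tail}"
-- ===== SOURCE B (Python) =====
-- def _inject_prisma_before_last_paragraph(methodology: str, prisma_svg: str) -> str:
--     svg_block = '<div class="prisma-flow">\n' + prisma_svg + '\n</div>'
--     acc = svg_block
--     seen = False
--     for part in reversed(methodology.split("\n\n")):
--         p = part.strip()
--         if not p:
--             continue
--         acc = (svg_block + "\n\n" + p) if not seen else (p + "\n\n" + acc)
--         seen = True
--     return acc
-- ===== Notes on version B (the rewrite author's own statement) =====
-- stated objective: alternative
-- what changed: Replaces A's staged pipeline (build paragraph list, three-way branch on its length, slice/join/strip) by a single reverse pass over the raw split parts with a string accumulator: the first non-blank part seen (the last paragraph) is prefixed by the SVG block, every earlier one is prepended with a separator; no paragraph list, no slicing and no join are ever built.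
import Mathlib
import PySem

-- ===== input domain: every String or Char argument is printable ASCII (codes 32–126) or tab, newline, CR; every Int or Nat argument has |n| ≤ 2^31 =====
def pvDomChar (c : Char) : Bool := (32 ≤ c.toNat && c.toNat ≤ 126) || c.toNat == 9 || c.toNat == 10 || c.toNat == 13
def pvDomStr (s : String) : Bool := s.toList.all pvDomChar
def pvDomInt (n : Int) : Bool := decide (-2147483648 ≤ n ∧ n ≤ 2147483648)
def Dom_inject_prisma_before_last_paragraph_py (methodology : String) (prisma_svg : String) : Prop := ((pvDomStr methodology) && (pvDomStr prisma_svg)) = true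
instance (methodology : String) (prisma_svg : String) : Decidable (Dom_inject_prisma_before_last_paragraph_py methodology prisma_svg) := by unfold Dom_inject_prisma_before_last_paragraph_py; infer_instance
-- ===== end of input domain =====

-- B replaces A's staged pipeline (paragraph list, three-way length branch, slice/join/strip)
-- by one reverse pass over the raw split parts with a string accumulator; same result, same cost.

-- ===== PORT A =====
def inject_prisma_before_last_paragraph_py (methodology : String) (prisma_svg : String) : String :=
  let paragraphs : List String :=
    ((PySem.Str.split? methodology "\n\n").getD []).filterMap
      (fun part => if PySem.Str.strip part = "" then none else some (PySem.Str.strip part))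
  let svg_block : String :=
    PySem.Str.join "\n" ["<div class=\"prisma-flow\">", prisma_svg, "</div>"]
  if paragraphs = [] then svg_block
  else if paragraphs.length = 1 then
    PySem.Str.join "\n\n" [svg_block, PySem.List.pyGetD paragraphs 0 ""]
  else
    let head := PySem.Str.strip (PySem.Str.join "\n\n" (PySem.List.slice paragraphs none (some (-1))))
    let tail := PySem.List.pyGetD paragraphs (-1) ""
    PySem.Str.join "\n\n" [head, svg_block, tail]

-- ===== PORT B =====
-- Source B's reverse loop; Python string concatenation is ported as List Char append
-- (exact: Lean's own String.append is opaque to the kernel, so the accumulator lives on .toList).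
def inject_prisma_before_last_paragraph_py_alt (methodology : String) (prisma_svg : String) : String :=
  let svg_block : List Char :=
    "<div class=\"prisma-flow\">\n".toList ++ prisma_svg.toList ++ "\n</div>".toList
  let res :=
    ((PySem.Str.split? methodology "\n\n").getD []).reverse.foldl
      (fun (st : List Char × Bool) part =>
        let p := PySem.Chars.strip part.toList
        if p = [] then st
        else ((if st.2 = false then svg_block ++ "\n\n".toList ++ p
               else p ++ "\n\n".toList ++ st.1), true))
      (svg_block, false)
  String.ofList res.1

-- ===== PRECONDITION & SPEC =====
def Spec_inject_prisma_before_last_paragraph_py (methodology : String) (prisma_svg : String) (out : String) : Prop := out = inject_prisma_before_last_paragraph_py_alt methodology prisma_svg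
instance (methodology : String) (prisma_svg : String) (out : String) : Decidable (Spec_inject_prisma_before_last_paragraph_py methodology prisma_svg out) := by unfold Spec_inject_prisma_before_last_paragraph_py; infer_instance

-- ===== CLAIM (what is proved, stated in full; the proofs are below) =====
def Claim_equal_inject_prisma_before_last_paragraph_py : Prop := ∀ (methodology : String) (prisma_svg : String), Dom_inject_prisma_before_last_paragraph_py methodology prisma_svg → Spec_inject_prisma_before_last_paragraph_py methodology prisma_svg (inject_prisma_before_last_paragraph_py methodology prisma_svg)

-- ===== LEMMAS AND PROOFS =====

theorem pvStrExt {a b : String} (h : a.toList = b.toList) : a = b := by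
  rw [← String.ofList_toList (s := a), h, String.ofList_toList]

theorem pvDropWhileIdem {α : Type} (p : α → Bool) (l : List α) :
    List.dropWhile p (List.dropWhile p l) = List.dropWhile p l := by
  induction l with
  | nil => simp
  | cons a t ih =>
    by_cases h : p a
    · simpa [h] using ih
    · simp [h]

theorem pvDwHead {α : Type} (p : α → Bool) (l : List α) (h : List.dropWhile p l = l)
    (hl : 0 < l.length) : p l[0] = false := by
  have := List.dropWhile_eq_self_iff.mp h hl
  simpa using this

theorem pvLstripSelf (s : List Char) (h : ∀ _ : 0 < s.length, PySem.Chars.isspace s[0] = false) :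
    PySem.Chars.lstrip s = s := by
  unfold PySem.Chars.lstrip
  exact List.dropWhile_eq_self_iff.mpr (fun hl => by simp [h hl])

theorem pvRstripSelf (s : List Char)
    (h : ∀ _ : 0 < s.reverse.length, PySem.Chars.isspace s.reverse[0] = false) :
    PySem.Chars.rstrip s = s := by
  unfold PySem.Chars.rstrip
  rw [List.dropWhile_eq_self_iff.mpr (fun hl => by simpa using h hl), List.reverse_reverse]

-- strip s = s splits into lstrip s = s and rstrip s = s
theorem pvStripParts (s : List Char) (h : PySem.Chars.strip s = s) :
    PySem.Chars.lstrip s = s ∧ PySem.Chars.rstrip s = s := by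
  have hs : PySem.Chars.rstrip (PySem.Chars.lstrip s) = s := h
  have hsuf : PySem.Chars.lstrip s <:+ s := List.dropWhile_suffix _
  have hlen2 : (PySem.Chars.lstrip s).length ≤ s.length := hsuf.length_le
  have hlen1 : s.length ≤ (PySem.Chars.lstrip s).length := by
    have hr : (PySem.Chars.rstrip (PySem.Chars.lstrip s)).length ≤ (PySem.Chars.lstrip s).length := by
      unfold PySem.Chars.rstrip
      simp only [List.length_reverse]
      have := List.length_dropWhile_le PySem.Chars.isspace (PySem.Chars.lstrip s).reverse
      simpa using this
    rw [hs] at hr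
    exact hr
  have hl : PySem.Chars.lstrip s = s := hsuf.eq_of_length (by omega)
  refine ⟨hl, ?_⟩
  rw [hl] at hs
  exact hs

theorem pvHeadNonspace (s : List Char) (h : PySem.Chars.strip s = s) (hl : 0 < s.length) :
    PySem.Chars.isspace s[0] = false :=
  pvDwHead _ _ ((pvStripParts s h).1) hl

theorem pvLastNonspace (s : List Char) (h : PySem.Chars.strip s = s)
    (hl : 0 < s.reverse.length) : PySem.Chars.isspace s.reverse[0] = false := by
  have hr : PySem.Chars.rstrip s = s := (pvStripParts s h).2
  have : List.dropWhile PySem.Chars.isspace s.reverse = s.reverse := by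
    have := congrArg List.reverse hr
    unfold PySem.Chars.rstrip at this
    simpa using this
  exact pvDwHead _ _ this hl

theorem pvStripIdem (s : List Char) :
    PySem.Chars.strip (PySem.Chars.strip s) = PySem.Chars.strip s := by
  have hrr : PySem.Chars.rstrip (PySem.Chars.strip s) = PySem.Chars.strip s := by
    unfold PySem.Chars.strip PySem.Chars.rstrip
    rw [List.reverse_reverse, pvDropWhileIdem]
  have hll : PySem.Chars.lstrip (PySem.Chars.strip s) = PySem.Chars.strip s := by
    have hpre : PySem.Chars.strip s <+: PySem.Chars.lstrip s := by
      have : List.dropWhile PySem.Chars.isspace (PySem.Chars.lstrip s).reverse <:+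
          (PySem.Chars.lstrip s).reverse := List.dropWhile_suffix _
      unfold PySem.Chars.strip PySem.Chars.rstrip
      have h2 := List.reverse_prefix.mpr this
      simpa using h2
    apply pvLstripSelf
    intro hl
    have hlen : 0 < (PySem.Chars.lstrip s).length :=
      Nat.lt_of_lt_of_le hl hpre.length_le
    have he : (PySem.Chars.strip s)[0] = (PySem.Chars.lstrip s)[0] := hpre.getElem hl
    rw [he]
    exact pvDwHead _ _ (pvDropWhileIdem _ s) hlen
  unfold PySem.Chars.strip
  calc PySem.Chars.rstrip (PySem.Chars.lstrip (PySem.Chars.rstrip (PySem.Chars.lstrip s)))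
      = PySem.Chars.rstrip (PySem.Chars.strip s) := by rw [show PySem.Chars.lstrip (PySem.Chars.rstrip (PySem.Chars.lstrip s)) = PySem.Chars.strip s from hll]
    _ = PySem.Chars.strip s := hrr

theorem pvJoinHead? (sep : List Char) (a : List Char) (rest : List (List Char)) (ha : a ≠ []) :
    (PySem.Chars.join sep (a :: rest)).head? = a.head? := by
  cases rest with
  | nil => rw [PySem.Chars.join_singleton]
  | cons b t =>
    rw [PySem.Chars.join_cons_cons, List.append_assoc, List.head?_append]
    cases a with
    | nil => exact absurd rfl ha
    | cons c cs => rfl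

theorem pvJoinLast? (sep : List Char) (l : List (List Char)) (hl : l ≠ [])
    (h : ∀ e ∈ l, e ≠ []) :
    (PySem.Chars.join sep l).getLast? = (l.getLast hl).getLast? := by
  induction l with
  | nil => exact absurd rfl hl
  | cons a rest ih =>
    cases rest with
    | nil => rw [PySem.Chars.join_singleton]; rfl
    | cons b t =>
      have hbt : (b :: t : List (List Char)) ≠ [] := by simp
      have ihv := ih hbt (fun e he => h e (List.mem_cons_of_mem a he))
      have hne : PySem.Chars.join sep (b :: t) ≠ [] := by
        intro hc
        have hlast : ((b :: t).getLast hbt).getLast? ≠ none := by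
          have := h ((b :: t).getLast hbt) (List.mem_cons_of_mem a (List.getLast_mem hbt))
          simpa [List.getLast?_eq_none_iff] using this
        rw [← ihv, hc] at hlast
        exact hlast rfl
      rw [PySem.Chars.join_cons_cons, List.append_assoc,
        List.getLast?_append_of_ne_nil _ (by simp [hne]), List.getLast?_append_of_ne_nil _ hne,
        ihv, List.getLast_cons hbt]

theorem pvStripJoin (sep : List Char) (l : List (List Char)) (hl : l ≠ [])
    (h : ∀ e ∈ l, PySem.Chars.strip e = e ∧ e ≠ []) :
    PySem.Chars.strip (PySem.Chars.join sep l) = PySem.Chars.join sep l := by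
  obtain ⟨a, rest, rfl⟩ : ∃ a rest, l = a :: rest := by
    cases l with
    | nil => exact absurd rfl hl
    | cons a rest => exact ⟨a, rest, rfl⟩
  have ha := h a List.mem_cons_self
  have hlst : PySem.Chars.lstrip (PySem.Chars.join sep (a :: rest)) =
      PySem.Chars.join sep (a :: rest) := by
    apply pvLstripSelf
    intro hlen
    have hh : (PySem.Chars.join sep (a :: rest)).head? = a.head? := pvJoinHead? sep a rest ha.2
    have ha0 : 0 < a.length := List.length_pos_iff.mpr ha.2
    rw [List.head?_eq_getElem?, List.getElem?_eq_getElem hlen,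
      List.head?_eq_getElem?, List.getElem?_eq_getElem ha0] at hh
    have : (PySem.Chars.join sep (a :: rest))[0] = a[0] := by
      exact Option.some_injective _ hh
    rw [this]
    exact pvHeadNonspace a ha.1 ha0
  have hrst : PySem.Chars.rstrip (PySem.Chars.join sep (a :: rest)) =
      PySem.Chars.join sep (a :: rest) := by
    apply pvRstripSelf
    intro hlen
    have hgl := pvJoinLast? sep (a :: rest) (by simp) (fun e he => (h e he).2)
    set e := (a :: rest).getLast (by simp) with hedef
    have hee := h e (List.getLast_mem _)
    have he0 : 0 < e.reverse.length := by
      simpa [List.length_reverse, List.length_pos_iff] using hee.2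
    rw [List.getLast?_eq_head?_reverse, List.getLast?_eq_head?_reverse,
      List.head?_eq_getElem?, List.getElem?_eq_getElem hlen,
      List.head?_eq_getElem?, List.getElem?_eq_getElem he0] at hgl
    have : (PySem.Chars.join sep (a :: rest)).reverse[0] = e.reverse[0] :=
      Option.some_injective _ hgl
    rw [this]
    exact pvLastNonspace e hee.1 he0
  unfold PySem.Chars.strip
  rw [hlst, hrst]

-- the paragraphs list of port A consists of stripped, non-empty strings
theorem pvParagraphsProp (m : String) :
    ∀ p ∈ ((PySem.Str.split? m "\n\n").getD []).filterMap
      (fun part => if PySem.Str.strip part = "" then none else some (PySem.Str.strip part)),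
      PySem.Str.strip p = p ∧ p ≠ "" := by
  intro p hp
  obtain ⟨part, _, hf⟩ := List.mem_filterMap.mp hp
  by_cases hc : PySem.Str.strip part = ""
  · simp [hc] at hf
  · simp only [hc, if_false, Option.some_inj] at hf
    subst hf
    constructor
    · apply pvStrExt
      rw [PySem.Str.toList_strip, PySem.Str.toList_strip, pvStripIdem]
    · exact hc

theorem pvStripToList {p : String} (h : PySem.Str.strip p = p) :
    PySem.Chars.strip p.toList = p.toList := by
  have := congrArg String.toList h
  rwa [PySem.Str.toList_strip] at this

theorem pvNeNilToList {p : String} (h : p ≠ "") : p.toList ≠ [] := by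
  intro hc
  exact h (pvStrExt (by simpa using hc))

-- the two svg blocks have the same character list
theorem pvSvgChars (x : String) :
    (PySem.Str.join "\n" ["<div class=\"prisma-flow\">", x, "</div>"]).toList =
      "<div class=\"prisma-flow\">\n".toList ++ x.toList ++ "\n</div>".toList := by
  rw [PySem.Str.toList_join]
  simp only [List.map]
  rw [PySem.Chars.join_cons_cons, PySem.Chars.join_cons_cons, PySem.Chars.join_singleton]
  have h1 : "<div class=\"prisma-flow\">".toList ++ "\n".toList =
      "<div class=\"prisma-flow\">\n".toList := by decide
  have h2 : "\n".toList ++ "</div>".toList = "\n</div>".toList := by decide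
  rw [← h1, ← h2]
  simp [List.append_assoc]

-- the shape B's backward accumulation produces (proof-only helper)
def pvRender (svg : List Char) : List (List Char) → List Char
  | [] => svg
  | [p] => svg ++ "\n\n".toList ++ p
  | p :: q :: t => p ++ "\n\n".toList ++ pvRender svg (q :: t)

-- skipping blank parts in the fold = folding over A's filterMap list
theorem pvFoldrFilter (svg : List Char) (raw : List String) (init : List Char × Bool) :
    raw.foldr (fun part st =>
        let p := PySem.Chars.strip part.toList
        if p = [] then st
        else ((if st.2 = false then svg ++ "\n\n".toList ++ p
               else p ++ "\n\n".toList ++ st.1), true)) init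
  = ((raw.filterMap (fun part => if PySem.Str.strip part = "" then none else some (PySem.Str.strip part))).map String.toList).foldr
      (fun p st => ((if st.2 = false then svg ++ "\n\n".toList ++ p
                     else p ++ "\n\n".toList ++ st.1), true)) init := by
  induction raw with
  | nil => rfl
  | cons a t ih =>
    by_cases h : PySem.Str.strip a = ""
    · have hc : PySem.Chars.strip a.toList = [] := by
        have := congrArg String.toList h
        rwa [PySem.Str.toList_strip] at this
      simp only [List.foldr_cons, List.filterMap_cons, h, hc, reduceIte]
      exact ih
    · have hc : PySem.Chars.strip a.toList ≠ [] := by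
        intro hc
        exact h (pvStrExt (by rw [PySem.Str.toList_strip, hc]; rfl))
      simp only [List.foldr_cons, List.filterMap_cons, h, hc, reduceIte, List.map_cons,
        PySem.Str.toList_strip, ih]

-- the fold over the (already filtered) paragraph char-lists computes pvRender
theorem pvFoldrRender (svg : List Char) (l : List (List Char)) :
    l.foldr (fun p st => ((if st.2 = false then svg ++ "\n\n".toList ++ p
                           else p ++ "\n\n".toList ++ st.1), true)) (svg, false)
  = (pvRender svg l, !l.isEmpty) := by
  induction l with
  | nil => rfl
  | cons a t ih =>
    cases t with
    | nil => rfl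
    | cons b t' =>
      rw [List.foldr_cons, ih]
      simp [pvRender]

-- render of a ≥2-element paragraph list in join/dropLast/getLast form
theorem pvRenderChars (svg : List Char) (a b : String) (t : List String) :
    pvRender svg (a.toList :: b.toList :: t.map String.toList) =
      PySem.Chars.join "\n\n".toList (((a :: b :: t).dropLast).map String.toList) ++ "\n\n".toList
        ++ svg ++ "\n\n".toList ++ ((a :: b :: t).getLast (by simp)).toList := by
  induction t generalizing a b with
  | nil =>
    simp only [List.map_nil, pvRender, List.dropLast, List.map_cons, PySem.Chars.join_singleton,
      List.getLast]
    simp [List.append_assoc]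
  | cons c t' ih =>
    have hstep : pvRender svg (a.toList :: b.toList :: (c :: t').map String.toList) =
        a.toList ++ "\n\n".toList ++ pvRender svg (b.toList :: c.toList :: t'.map String.toList) := rfl
    rw [hstep, ih]
    have hd : (a :: b :: c :: t').dropLast = a :: (b :: c :: t').dropLast := rfl
    have hd2 : (b :: c :: t').dropLast = b :: (c :: t').dropLast := rfl
    have hg : (a :: b :: c :: t').getLast (by simp) = (b :: c :: t').getLast (by simp) :=
      List.getLast_cons (by simp)
    rw [hd, hg, List.map_cons, hd2, List.map_cons, PySem.Chars.join_cons_cons]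
    simp [List.append_assoc]

-- A's branching expression equals pvRender over the same paragraphs
theorem pvACore (ps : List String) (x : String)
    (h : ∀ p ∈ ps, PySem.Str.strip p = p ∧ p ≠ "") :
    (if ps = [] then PySem.Str.join "\n" ["<div class=\"prisma-flow\">", x, "</div>"]
     else if ps.length = 1 then
       PySem.Str.join "\n\n" [PySem.Str.join "\n" ["<div class=\"prisma-flow\">", x, "</div>"],
         PySem.List.pyGetD ps 0 ""]
     else
       PySem.Str.join "\n\n"
         [PySem.Str.strip (PySem.Str.join "\n\n" (PySem.List.slice ps none (some (-1)))),
          PySem.Str.join "\n" ["<div class=\"prisma-flow\">", x, "</div>"],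
          PySem.List.pyGetD ps (-1) ""]).toList =
    pvRender ("<div class=\"prisma-flow\">\n".toList ++ x.toList ++ "\n</div>".toList)
      (ps.map String.toList) := by
  cases ps with
  | nil =>
    rw [if_pos rfl]
    exact pvSvgChars x
  | cons a rest =>
    cases rest with
    | nil =>
      rw [if_neg (by simp), if_pos (by simp), PySem.List.pyGetD_zero_cons]
      rw [PySem.Str.toList_join]
      simp only [List.map, pvRender]
      rw [PySem.Chars.join_cons_cons, PySem.Chars.join_singleton, pvSvgChars]
    | cons b t =>
      have hne : (a :: b :: t : List String) ≠ [] := by simp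
      rw [if_neg (by simp), if_neg (by simp)]
      have hlen : (a :: b :: t).length - 1 = t.length + 1 := by simp
      have hd : (a :: b :: t).dropLast.length = t.length + 1 := by
        simp [List.length_dropLast]
      have hblocks : ∀ e ∈ (a :: b :: t).dropLast.map String.toList,
          PySem.Chars.strip e = e ∧ e ≠ [] := by
        intro e he
        obtain ⟨p, hp, rfl⟩ := List.mem_map.mp he
        have hps := h p (List.dropLast_subset _ hp)
        exact ⟨pvStripToList hps.1, pvNeNilToList hps.2⟩
      have hmne : (a :: b :: t).dropLast.map String.toList ≠ [] := by
        simp [List.dropLast]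
      rw [PySem.List.slice_to_neg_one, PySem.List.pyGetD_neg_one _ _ hne]
      rw [PySem.Str.toList_join]
      simp only [List.map]
      rw [PySem.Chars.join_cons_cons, PySem.Chars.join_cons_cons, PySem.Chars.join_singleton,
        PySem.Str.toList_strip, PySem.Str.toList_join,
        pvStripJoin _ _ hmne hblocks, pvSvgChars]
      rw [pvRenderChars]
      simp [List.append_assoc]

-- ===== VERDICT (by name: the statement is the Claim_ definition above) =====
theorem inject_prisma_before_last_paragraph_py_spec : Claim_equal_inject_prisma_before_last_paragraph_py := by
  intro m x _
  unfold Spec_inject_prisma_before_last_paragraph_py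
  unfold inject_prisma_before_last_paragraph_py inject_prisma_before_last_paragraph_py_alt
  apply pvStrExt
  rw [String.toList_ofList, List.foldl_reverse, pvFoldrFilter, pvFoldrRender]
  exact pvACore _ x (pvParagraphsProp m)
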